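-- pv_equiv track=rewrite | github.com/sticky-ai/Algorithms | codesignal/arcade/the_core/threeSplit.py | threeSplit
-- ===== SOURCE A (Python) =====
-- def threeSplit(a):
--
--     s = sum(a) // 3
--     foo = [sum(a[:i+1]) for i in range(len(a))]
--     bar = [i for i in range(len(a) - 2) if foo[i] == s]
--     answer = [foo[i+1:-1].count(2 * s) for i in bar]
--     return sum(answer)
--
--     """ Time Limitation
--     prod = product(range(len(a) - 1), repeat = 3)
--     perms = [i for i in prod if sum(i) == len(a) and i.count(0) == 0]
--     ans = [0 for f, s, t in perms if sum(a[:f]) == sum(a[f:f+s]) == sum(a[f+s:f+s+t])]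
--     return len(ans) """
-- ===== SOURCE B (Python) =====
-- def threeSplit(a):
--     s = sum(a) // 3
--     count = 0
--     seen = 0
--     prefix = 0
--     for x in a[:-1]:
--         prefix += x
--         if prefix == 2 * s:
--             count += seen
--         if prefix == s:
--             seen += 1
--     return count
-- ===== Notes on version B (the rewrite author's own statement) =====
-- stated objective: faster
-- what changed: Replaced A's per-index counting over slices of the prefix-sum list (an inner .count scan for every matching index) by a single left-to-right pass that keeps a running prefix sum, the number of s-prefixes seen so far, and adds that number whenever the running prefix equals 2*s.
import Mathlib
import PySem

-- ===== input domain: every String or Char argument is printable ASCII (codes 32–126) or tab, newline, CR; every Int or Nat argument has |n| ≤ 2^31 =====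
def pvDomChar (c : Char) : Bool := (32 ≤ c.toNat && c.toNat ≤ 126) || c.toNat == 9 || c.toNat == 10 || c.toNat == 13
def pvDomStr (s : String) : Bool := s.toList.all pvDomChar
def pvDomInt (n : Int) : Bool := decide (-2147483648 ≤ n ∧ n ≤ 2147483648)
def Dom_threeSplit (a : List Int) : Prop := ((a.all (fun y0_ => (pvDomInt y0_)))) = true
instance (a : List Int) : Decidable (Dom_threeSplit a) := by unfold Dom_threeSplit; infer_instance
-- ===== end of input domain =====

-- B replaces A's per-index .count scans over slices of the prefix-sum list by one linear pass that
-- counts s-prefixes seen so far and adds that count at each 2*s-prefix (objective: faster).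

-- ===== PORT A =====
def threeSplit (a : List Int) : Int :=
  let s := PySem.Int.floordiv a.sum 3
  let foo := (PySem.List.pyRange 0 (a.length : Int) 1).map
      (fun i => (PySem.List.slice a none (some (i + 1))).sum)
  let bar := (PySem.List.pyRange 0 ((a.length : Int) - 2) 1).filter
      (fun i => PySem.List.pyGetD foo i 0 == s)
  let answer := bar.map
      (fun i => ((PySem.List.count (PySem.List.slice foo (some (i + 1)) (some (-1))) (2 * s) : Nat) : Int))
  answer.sum

-- ===== PORT B =====
def threeSplit_alt (a : List Int) : Int :=
  let s := PySem.Int.floordiv a.sum 3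
  let r := (PySem.List.slice a none (some (-1))).foldl
      (fun (st : Int × Int × Int) x =>
        (st.1 + x,
         if st.1 + x = s then st.2.1 + 1 else st.2.1,
         if st.1 + x = 2 * s then st.2.2 + st.2.1 else st.2.2)) (0, 0, 0)
  r.2.2

-- ===== PRECONDITION & SPEC =====
def Spec_threeSplit (a : List Int) (out : Int) : Prop := out = threeSplit_alt a
instance (a : List Int) (out : Int) : Decidable (Spec_threeSplit a out) := by unfold Spec_threeSplit; infer_instance

-- ===== CLAIM (what is proved, stated in full; the proofs are below) =====
def Claim_equal_threeSplit : Prop := ∀ (a : List Int), Dom_threeSplit a → Spec_threeSplit a (threeSplit a)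

-- ===== LEMMAS AND PROOFS =====

-- prefix sums of l continuing from an already-accumulated value p
def pvPS (p : Int) : List Int → List Int
  | [] => []
  | x :: l => (p + x) :: pvPS (p + x) l

-- the common hub: for each s-element, count the 2*s-elements strictly after it
def pvF (s : Int) : List Int → Int
  | [] => 0
  | x :: l => (if x = s then ((List.count (2 * s) l : Nat) : Int) else 0) + pvF s l

theorem pvPS_length (p : Int) (l : List Int) : (pvPS p l).length = l.length := by
  induction l generalizing p with
  | nil => rfl
  | cons x l ih => simp [pvPS, ih]

theorem pvPS_take (p : Int) (l : List Int) (k : Nat) :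
    pvPS p (l.take k) = (pvPS p l).take k := by
  induction l generalizing p k with
  | nil => simp [pvPS]
  | cons x l ih =>
    cases k with
    | zero => simp [pvPS]
    | succ k => simp [pvPS, ih]

theorem pvPS_dropLast (p : Int) (l : List Int) :
    pvPS p l.dropLast = (pvPS p l).dropLast := by
  rw [List.dropLast_eq_take, List.dropLast_eq_take, pvPS_take, pvPS_length]

theorem pvPS_eq_map_range (p : Int) (l : List Int) :
    pvPS p l = (List.range l.length).map (fun k => p + (l.take (k + 1)).sum) := by
  induction l generalizing p with
  | nil => simp [pvPS]
  | cons x l ih =>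
    simp only [pvPS, List.length_cons, List.range_succ_eq_map, List.map_cons, List.map_map,
      List.cons.injEq]
    refine ⟨by simp, ?_⟩
    rw [ih (p + x)]
    apply List.map_congr_left
    intro k _
    simp [add_assoc]

theorem pvF_short (s : Int) (M : List Int) (h : M.length ≤ 1) : pvF s M = 0 := by
  match M with
  | [] => rfl
  | [x] => simp [pvF]
  | x :: y :: l => simp at h

-- B's fold, characterised
theorem pvFold_eq (s : Int) (l : List Int) (p seen cnt : Int) :
    (l.foldl
      (fun (st : Int × Int × Int) x =>
        (st.1 + x,
         if st.1 + x = s then st.2.1 + 1 else st.2.1,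
         if st.1 + x = 2 * s then st.2.2 + st.2.1 else st.2.2)) (p, seen, cnt)).2.2
    = cnt + seen * ((List.count (2 * s) (pvPS p l) : Nat) : Int) + pvF s (pvPS p l) := by
  induction l generalizing p seen cnt with
  | nil => simp [pvPS, pvF]
  | cons x l ih =>
    simp only [List.foldl_cons, pvPS, pvF]
    rw [ih]
    simp only [List.count_cons, beq_iff_eq]
    split_ifs <;> push_cast <;> ring

-- A's per-index sum, characterised
theorem pvSum_eq (s : Int) (L : List Int) :
    ((List.range L.length).map
      (fun k => if L.getD k 0 = s then ((List.count (2 * s) (L.drop (k + 1)) : Nat) : Int) else 0)).sum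
    = pvF s L := by
  induction L with
  | nil => simp [pvF]
  | cons x L ih =>
    simp only [List.length_cons, List.range_succ_eq_map, List.map_cons, List.map_map]
    have htail :
        List.map ((fun k => if (x :: L).getD k 0 = s then ((List.count (2 * s) ((x :: L).drop (k + 1)) : Nat) : Int) else 0) ∘ Nat.succ) (List.range L.length)
        = List.map (fun k => if L.getD k 0 = s then ((List.count (2 * s) (L.drop (k + 1)) : Nat) : Int) else 0) (List.range L.length) := by
      apply List.map_congr_left
      intro k _
      simp
    rw [List.sum_cons, htail, ih]
    simp [pvF]

-- sum over a filtered-then-mapped list as an if-sum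
theorem pvSum_filter_map {α : Type} (p : α → Bool) (g : α → Int) (l : List α) :
    (((l.filter p).map g).sum) = (l.map (fun x => if p x then g x else 0)).sum := by
  induction l with
  | nil => rfl
  | cons x l ih =>
    by_cases h : p x <;> simp [h, ih]

-- xs[m:-1] = drop m of dropLast (m a natural index)
theorem pvSlice_natCast_neg_one (xs : List Int) (m : Nat) :
    PySem.List.slice xs (some (m : Int)) (some (-1)) = xs.dropLast.drop m := by
  have hm : ¬((m : Int) < 0) := by omega
  rcases eq_or_ne xs [] with rfl | hne
  · simp [PySem.List.slice]
  · by_cases h : m ≤ xs.length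
    · simp [PySem.List.slice, PySem.List.clampIdx, hne, hm, List.dropLast_eq_take, List.drop_take]
      rw [show min m xs.length = m from by omega]
      congr 1
      omega
    · have h1 : List.drop m xs = [] := List.drop_eq_nil_of_le (by omega)
      simp [PySem.List.slice, PySem.List.clampIdx, hne, hm, List.dropLast_eq_take, List.drop_take, h1]
      right
      omega

theorem pvFoo_eq (a : List Int) :
    (PySem.List.pyRange 0 (a.length : Int) 1).map
      (fun i => (PySem.List.slice a none (some (i + 1))).sum) = pvPS 0 a := by
  rw [PySem.List.pyRange_one, List.map_map, pvPS_eq_map_range]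
  simp only [sub_zero, Int.toNat_natCast]
  apply List.map_congr_left
  intro k _
  simp only [Function.comp, zero_add]
  rw [show ((k : Int) + 1) = ((k + 1 : Nat) : Int) from by push_cast; ring,
    PySem.List.slice_to_natCast]

theorem threeSplit_alt_eq_hub (a : List Int) :
    threeSplit_alt a = pvF (PySem.Int.floordiv a.sum 3) ((pvPS 0 a).dropLast) := by
  show ((PySem.List.slice a none (some (-1))).foldl _ (0, 0, 0)).2.2 = _
  rw [PySem.List.slice_to_neg_one, pvFold_eq, pvPS_dropLast]
  ring

theorem threeSplit_eq_hub (a : List Int) :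
    threeSplit a = pvF (PySem.Int.floordiv a.sum 3) ((pvPS 0 a).dropLast) := by
  unfold threeSplit
  rw [pvFoo_eq]
  set s := PySem.Int.floordiv a.sum 3 with hs
  set L := (pvPS 0 a).dropLast with hL
  have hlenps : (pvPS 0 a).length = a.length := pvPS_length 0 a
  have hlenL : L.length = a.length - 1 := by
    rw [hL, List.length_dropLast, hlenps]
  by_cases hn : a.length ≤ 2
  · have hnil : PySem.List.pyRange 0 ((a.length : Int) - 2) 1 = [] :=
      PySem.List.pyRange_one_eq_nil (by omega)
    rw [hnil, pvF_short s L (by omega)]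
    rfl
  · -- a.length ≥ 3
    rw [show ((a.length : Int) - 2) = ((a.length - 2 : Nat) : Int) from by omega,
      PySem.List.pyRange_one]
    simp only [sub_zero, Int.toNat_natCast]
    rw [List.filter_map, List.map_map, pvSum_filter_map]
    have hterm : ∀ k ∈ List.range (a.length - 2),
        (fun k : Nat =>
          if ((fun i => PySem.List.pyGetD (pvPS 0 a) i 0 == s) ∘ fun k : Nat => (0 : Int) + ↑k) k = true then
            ((fun i => ((PySem.List.count (PySem.List.slice (pvPS 0 a) (some (i + 1)) (some (-1))) (2 * s) : Nat) : Int)) ∘ fun k : Nat => (0 : Int) + ↑k) k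
          else 0) k
        = (fun k : Nat => if L.getD k 0 = s then ((List.count (2 * s) (L.drop (k + 1)) : Nat) : Int) else 0) k := by
      intro k hk
      simp only [List.mem_range] at hk
      simp only [Function.comp, zero_add, beq_iff_eq]
      have hget : PySem.List.pyGetD (pvPS 0 a) (k : Int) 0 = L.getD k 0 := by
        rw [PySem.List.pyGetD_natCast, hL, List.getD_eq_getElem?_getD, List.getD_eq_getElem?_getD,
          List.getElem?_dropLast, if_pos (by omega)]
      have hslice : PySem.List.slice (pvPS 0 a) (some ((k : Int) + 1)) (some (-1))
          = L.drop (k + 1) := by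
        rw [show ((k : Int) + 1) = ((k + 1 : Nat) : Int) from by push_cast; ring,
          pvSlice_natCast_neg_one, hL]
      rw [hget, hslice, PySem.List.count_eq]
    rw [List.map_congr_left hterm]
    have hps := pvSum_eq s L
    rw [hlenL, show a.length - 1 = (a.length - 2) + 1 from by omega, List.range_succ,
      List.map_append, List.sum_append] at hps
    have hzero : (List.map (fun k : Nat => if L.getD k 0 = s then ((List.count (2 * s) (L.drop (k + 1)) : Nat) : Int) else 0) [a.length - 2]).sum = 0 := by
      have : L.drop (a.length - 2 + 1) = [] := List.drop_eq_nil_of_le (by omega)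
      simp [this]
    rw [hzero, add_zero] at hps
    exact hps

-- ===== VERDICT (by name: the statement is the Claim_ definition above) =====
theorem threeSplit_spec : Claim_equal_threeSplit := by
  intro a _
  unfold Spec_threeSplit
  rw [threeSplit_eq_hub, threeSplit_alt_eq_hub]
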